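-- pv_equiv track=rewrite | github.com/ourresearch/openalex-text-api | oql.py | quick_entity_check
-- ===== SOURCE A (Python) =====
-- def quick_entity_check(prompt, oql_entities):
--
--     singular_entity = [x[:-1] if x != 'countries' else 'country' for x in oql_entities.keys()]
--     quick_check = \
--         [x for x in oql_entities.keys()] + \
--         [x[:-1] if x != 'countries' else 'country' for x in oql_entities.keys()] + \
--         [f"get {x}" for x in oql_entities.keys()] + \
--         [f"get {x}" for x in singular_entity]
--
--     matching_entities = \
--         [x for x in oql_entities.keys()]*4
--
--     if " ".join(prompt.replace("-", " ").replace("!", "").replace(".", "")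
--                 .replace("?", "").split(" ")).lower() in quick_check:
--         # get index of matching_entities
--         match = quick_check.index(" ".join(prompt.replace("-", " ").replace("!", "").replace(".", "")
--                 .replace("?", "").split(" ")).lower())
--         entity = matching_entities[match]
--         return entity
--     else:
--         return ""
-- ===== SOURCE B (Python) =====
-- def quick_entity_check(prompt, oql_entities):
--     norm = " ".join(prompt.replace("-", " ").replace("!", "").replace(".", "")
--                     .replace("?", "").split(" ")).lower()
--
--     def find(s):
--         if s in oql_entities:
--             return s
--         for k in oql_entities:
--             if (k[:-1] if k != 'countries' else 'country') == s:
--                 return k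
--         return None
--
--     hit = find(norm)
--     if hit is not None:
--         return hit
--     if norm.startswith("get "):
--         hit = find(norm[4:])
--         if hit is not None:
--             return hit
--     return ""
-- ===== Notes on version B (the rewrite author's own statement) =====
-- stated objective: simpler
-- what changed: B drops A's four concatenated variant lists, the parallel matching_entities list and the index() lookup, and instead normalizes once and does a staged first-match search: key, then first key with matching singular form, then the same two checks on the remainder after a 'get ' prefix, preserving A's priority order exactly.
import Mathlib
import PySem

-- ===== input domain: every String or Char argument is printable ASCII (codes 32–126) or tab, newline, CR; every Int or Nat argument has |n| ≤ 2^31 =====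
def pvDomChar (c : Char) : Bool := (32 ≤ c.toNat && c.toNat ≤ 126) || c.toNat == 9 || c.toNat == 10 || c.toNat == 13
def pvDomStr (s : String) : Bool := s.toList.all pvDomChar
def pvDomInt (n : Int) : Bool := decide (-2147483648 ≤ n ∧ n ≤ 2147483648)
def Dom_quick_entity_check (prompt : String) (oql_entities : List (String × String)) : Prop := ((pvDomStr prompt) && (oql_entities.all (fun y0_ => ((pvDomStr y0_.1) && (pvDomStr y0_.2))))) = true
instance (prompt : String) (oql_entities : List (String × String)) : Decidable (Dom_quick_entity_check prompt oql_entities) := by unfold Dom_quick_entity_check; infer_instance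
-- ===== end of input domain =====

-- B replaces A's four concatenated variant lists + index() lookup into a parallel list by a staged
-- first-match search (plain key, then singular form, then both again after stripping a "get " prefix);
-- objective: simpler.

-- shared helpers: the normalization chain and the singular form, identical expressions in both Pythons
def qecNorm (prompt : String) : String :=
  PySem.Str.lower (PySem.Str.join " "
    ((PySem.Str.split? (PySem.Str.replace (PySem.Str.replace (PySem.Str.replace
        (PySem.Str.replace prompt "-" " ") "!" "") "." "") "?" "") " ").getD []))

def qecSingular (x : String) : String :=
  if x ≠ "countries" then PySem.Str.slice x none (some (-1)) else "country"

-- ===== PORT A =====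
def quick_entity_check (prompt : String) (oql_entities : List (String × String)) : String :=
  let keys := (PySem.Dict.ofList oql_entities).keys
  let singular_entity := keys.map qecSingular
  let quick_check :=
    keys ++ keys.map qecSingular ++ keys.map (fun x => "get " ++ x)
      ++ singular_entity.map (fun x => "get " ++ x)
  let matching_entities := keys ++ keys ++ keys ++ keys
  if quick_check.contains (qecNorm prompt) then
    match PySem.List.index? quick_check (qecNorm prompt) with
    | some i => (PySem.List.pyGet? matching_entities (i : Int)).getD ""   -- guarded: index? is some here
    | none => ""
  else ""

-- ===== PORT B =====
def qecFind (keys : List String) (s : String) : Option String :=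
  if keys.contains s then some s
  else keys.find? (fun k => qecSingular k == s)

def quick_entity_check_alt (prompt : String) (oql_entities : List (String × String)) : String :=
  let keys := (PySem.Dict.ofList oql_entities).keys
  let norm := qecNorm prompt
  match qecFind keys norm with
  | some e => e
  | none =>
    if PySem.Str.startswith norm "get " then
      match qecFind keys (PySem.Str.slice norm (some 4) none) with
      | some e => e
      | none => ""
    else ""

-- ===== PRECONDITION & SPEC =====
def Spec_quick_entity_check (prompt : String) (oql_entities : List (String × String)) (out : String) : Prop := out = quick_entity_check_alt prompt oql_entities
instance (prompt : String) (oql_entities : List (String × String)) (out : String) : Decidable (Spec_quick_entity_check prompt oql_entities out) := by unfold Spec_quick_entity_check; infer_instance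

-- ===== CLAIM (what is proved, stated in full; the proofs are below) =====
def Claim_equal_quick_entity_check : Prop := ∀ (prompt : String) (oql_entities : List (String × String)), Dom_quick_entity_check prompt oql_entities → Spec_quick_entity_check prompt oql_entities (quick_entity_check prompt oql_entities)

-- ===== LEMMAS AND PROOFS =====

def qtab (q m : List String) (n : String) : Option String :=
  ((q.zip m).find? (fun p => p.1 == n)).map Prod.snd

lemma qtab_append (a b ma mb : List String) (n : String) (h : a.length = ma.length) :
    qtab (a ++ b) (ma ++ mb) n = (qtab a ma n).or (qtab b mb n) := by
  unfold qtab
  rw [List.zip_append h, List.find?_append]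
  cases (a.zip ma).find? (fun p => p.1 == n) <;> simp [Option.or]

lemma qtab_map (f : String → String) (ks : List String) (n : String) :
    qtab (ks.map f) ks n = ks.find? (fun k => f k == n) := by
  unfold qtab
  rw [← List.map_prod_right_eq_zip, List.find?_map]
  induction ks with
  | nil => rfl
  | cons k ks ih =>
    by_cases h : f k == n <;> simp [List.find?, Function.comp, h] at ih ⊢ <;> exact ih

lemma find?_beq (ks : List String) (n : String) :
    ks.find? (fun k => k == n) = if ks.contains n then some n else none := by
  induction ks with
  | nil => rfl
  | cons k ks ih =>
    by_cases h : k == n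
    · simp [List.find?, eq_of_beq h]
    · simp only [List.find?, h, List.contains_cons, Bool.or_eq_true] at ih ⊢
      rw [ih]; simp [show ¬ (n == k) from fun hh => h (by simpa using (beq_iff_eq.mp hh).symm)]

lemma qtab_self (ks : List String) (n : String) :
    qtab ks ks n = if ks.contains n then some n else none := by
  have : ks.zip ks = ks.map (fun x => ((fun y => y) x, x)) := by
    rw [List.map_prod_right_eq_zip]; simp
  unfold qtab
  rw [this, List.find?_map]
  rw [show ((fun p => p.1 == n) ∘ fun x => ((fun y => y) x, x)) = fun k => k == n from rfl]
  rw [find?_beq]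
  split <;> simp

lemma index_eq_qtab (q m : List String) (n : String) (h : q.length = m.length) :
    (if q.contains n then
       match PySem.List.index? q n with
       | some i => (PySem.List.pyGet? m (i : Int)).getD ""
       | none => ""
     else "") = (qtab q m n).getD "" := by
  induction q generalizing m with
  | nil => simp [qtab]
  | cons x q ih =>
    cases m with
    | nil => simp at h
    | cons y m =>
      simp only [List.length_cons, Nat.add_right_cancel_iff] at h
      by_cases hx : x == n
      · have hxn : x = n := eq_of_beq hx
        subst hxn
        rw [if_pos (by simp), PySem.List.index?_cons_self]
        show (PySem.List.pyGet? (y :: m) ((0 : Nat) : Int)).getD "" = _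
        rw [PySem.List.pyGet?_natCast]
        simp [qtab, List.find?]
      · have hne : x ≠ n := fun hh => hx (beq_iff_eq.mpr hh)
        have hcon : (x :: q).contains n = q.contains n := by
          simp only [List.contains_cons]
          rw [show (n == x) = false by simpa using Ne.symm hne]
          simp
        rw [PySem.List.index?_cons_of_ne q hne]
        have htab : qtab (x :: q) (y :: m) n = qtab q m n := by
          simp [qtab, List.find?, hx]
        rw [hcon, htab, ← ih m h]
        by_cases hq : q.contains n
        · simp only [hq, if_true]
          rcases Option.isSome_iff_exists.mp ((PySem.List.index?_isSome_iff q n).mpr (by simpa using hq)) with ⟨k, hk⟩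
          rw [hk]
          simp only [Option.map_some]
          rw [show ((↑(k + 1) : Int)) = ((k : Int) + 1) by push_cast; ring]
          rw [PySem.List.pyGet?_cons_succ, PySem.List.pyGet?_natCast]
        · have hnm : n ∉ q := by simpa using hq
          simp [hnm]

lemma slice4_append (k : String) :
    PySem.Str.slice ("get " ++ k) (some 4) none = k := by
  apply String.toList_inj.mp
  rw [PySem.Str.toList_slice, PySem.Chars.slice_eq_listSlice,
      PySem.List.slice_from _ (by norm_num : (0:Int) ≤ 4), String.toList_append]
  show List.drop "get ".toList.length _ = _
  rw [List.drop_left]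

lemma startswith_get_decomp (n : String) (h : PySem.Str.startswith n "get " = true) :
    n = "get " ++ PySem.Str.slice n (some 4) none := by
  rw [PySem.Str.startswith_eq, PySem.Chars.startswith_iff] at h
  rcases h with ⟨t, ht⟩
  apply String.toList_inj.mp
  rw [String.toList_append, PySem.Str.toList_slice, PySem.Chars.slice_eq_listSlice,
      PySem.List.slice_from _ (by norm_num : (0:Int) ≤ 4), ← ht]
  show _ = _ ++ List.drop "get ".toList.length _
  rw [List.drop_left]

lemma get_beq (k n : String) :
    (("get " ++ k) == n)
      = (PySem.Str.startswith n "get " && (PySem.Str.slice n (some 4) none == k)) := by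
  by_cases h : ("get " ++ k) = n
  · subst h
    have hsw : PySem.Str.startswith ("get " ++ k) "get " = true := by
      rw [PySem.Str.startswith_eq, PySem.Chars.startswith_iff, String.toList_append]
      exact List.prefix_append _ _
    rw [hsw, slice4_append]
    simp
  · rw [show (("get " ++ k) == n) = false by simpa using h]
    by_cases hsw : PySem.Str.startswith n "get " = true
    · have hne : PySem.Str.slice n (some 4) none ≠ k := by
        intro hk
        exact h (by rw [← hk]; exact (startswith_get_decomp n hsw).symm)
      rw [hsw, show (PySem.Str.slice n (some 4) none == k) = false by simpa using hne]
      rfl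
    · rw [eq_false_of_ne_true hsw]
      rfl

lemma core_eq (ks : List String) (n : String) :
    (if (ks ++ ks.map qecSingular ++ ks.map (fun x => "get " ++ x)
          ++ (ks.map qecSingular).map (fun x => "get " ++ x)).contains n then
       match PySem.List.index? (ks ++ ks.map qecSingular ++ ks.map (fun x => "get " ++ x)
          ++ (ks.map qecSingular).map (fun x => "get " ++ x)) n with
       | some i => (PySem.List.pyGet? (ks ++ ks ++ ks ++ ks) (i : Int)).getD ""
       | none => ""
     else "")
    = (match qecFind ks n with
       | some e => e
       | none =>
         if PySem.Str.startswith n "get " then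
           match qecFind ks (PySem.Str.slice n (some 4) none) with
           | some e => e
           | none => ""
         else "") := by
  rw [index_eq_qtab _ _ _ (by simp)]
  rw [qtab_append _ _ _ _ _ (by simp), qtab_append _ _ _ _ _ (by simp),
      qtab_append _ _ _ _ _ (by simp)]
  rw [qtab_self, qtab_map, qtab_map, List.map_map, qtab_map]
  simp only [qecFind, Function.comp]
  by_cases hc : ks.contains n
  · have hm : n ∈ ks := by simpa using hc
    simp [hm]
  · have hm : ¬ n ∈ ks := by simpa using hc
    simp only [hc, if_false, Bool.false_eq_true, Option.or]
    cases hf : ks.find? (fun k => qecSingular k == n) with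
    | some e => simp
    | none =>
      simp only [Option.or_none, Option.none_or]
      by_cases hsw : PySem.Str.startswith n "get " = true
      · rw [show (fun k => (("get " ++ k) == n)) = fun k => (k == PySem.Str.slice n (some 4) none) from by
            funext k; rw [get_beq, hsw, Bool.true_and, Bool.beq_comm]]
        rw [show (fun k => (("get " ++ qecSingular k) == n))
              = fun k => (qecSingular k == PySem.Str.slice n (some 4) none) from by
            funext k; rw [get_beq, hsw, Bool.true_and, Bool.beq_comm]]
        rw [hsw, find?_beq]
        by_cases hc4 : ks.contains (PySem.Str.slice n (some 4) none)
        · have hm4 : PySem.Str.slice n (some 4) none ∈ ks := by simpa using hc4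
          simp [hc4, hm4]
        · have hm4 : ¬ PySem.Str.slice n (some 4) none ∈ ks := by simpa using hc4
          simp only [hc4, Bool.false_eq_true, if_false, reduceIte]
          cases ks.find? (fun k => qecSingular k == PySem.Str.slice n (some 4) none) <;> rfl
      · rw [show (fun k => (("get " ++ k) == n)) = fun _ => false from by
            funext k; rw [get_beq, eq_false_of_ne_true hsw, Bool.false_and]]
        rw [show (fun k => (("get " ++ qecSingular k) == n)) = fun _ => false from by
            funext k; rw [get_beq, eq_false_of_ne_true hsw, Bool.false_and]]
        rw [eq_false_of_ne_true hsw,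
            show List.find? (fun (_ : String) => false) ks = none from by simp]
        rfl

-- ===== VERDICT (by name: the statement is the Claim_ definition above) =====
theorem quick_entity_check_spec : Claim_equal_quick_entity_check := by
  intro prompt oql _
  unfold Spec_quick_entity_check quick_entity_check quick_entity_check_alt
  exact core_eq _ _
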